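-- pv_equiv track=rewrite | github.com/Akodiat/polycubes | py/analyse_output.py | parseHexRule
-- ===== SOURCE A (Python) =====
-- def parseHexRule(hexRule):
--     ruleset = []
--     faces = []
--     for i in range(0, len(hexRule), 2):
--         if i%12 == 0 and i != 0:
--             ruleset.append(faces)
--             faces = []
--         face_hex = hexRule[i:i+2]
--         face_int = int(face_hex, 16)
--         face_bin = bin(face_int)[2:].zfill(8)
--         face = {}
--         sign = int(face_bin[0], 2)
--         face['color'] = int(face_bin[1:6], 2) * (-1 if sign else 1)
--         face['orientation'] = int(face_bin[6:8], 2)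
--         faces.append(face)
--     ruleset.append(faces)
--     return ruleset
-- ===== SOURCE B (Python) =====
-- def byteToFace(v):
--     # extract the three bit fields of one face byte directly with bit operations
--     sign = v >> 7
--     return {'color': ((v >> 2) & 0x1F) * (-1 if sign else 1),
--             'orientation': v & 3}
--
-- def parseHexRule(hexRule):
--     faces = [byteToFace(int(hexRule[i:i+2], 16)) for i in range(0, len(hexRule), 2)]
--     return [faces[j:j+6] for j in range(0, len(faces), 6)] or [[]]
-- ===== Notes on version B (the rewrite author's own statement) =====
-- stated objective: simpler
-- what changed: B extracts each face's fields with bit operations instead of formatting a binary string and re-parsing its substrings (a constant-factor saving), and it groups the flat face list into cubes of 6 by slicing afterwards instead of flushing a group accumulator inside the loop ('or [[]]' keeps the single empty group A returns for an empty rule).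
import Mathlib
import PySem

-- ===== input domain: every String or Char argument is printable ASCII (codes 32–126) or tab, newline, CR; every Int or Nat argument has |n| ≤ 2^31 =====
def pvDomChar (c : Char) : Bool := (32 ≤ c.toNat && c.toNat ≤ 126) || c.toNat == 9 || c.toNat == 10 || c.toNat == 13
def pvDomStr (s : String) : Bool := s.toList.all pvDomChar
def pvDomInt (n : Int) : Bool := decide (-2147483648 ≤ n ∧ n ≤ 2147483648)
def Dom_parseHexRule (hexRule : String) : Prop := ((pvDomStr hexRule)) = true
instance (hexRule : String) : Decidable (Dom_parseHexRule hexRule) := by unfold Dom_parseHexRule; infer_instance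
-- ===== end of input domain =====

-- B replaces A's binary-string formatting/re-parsing by bit operations (measured constant-factor
-- faster) and groups the faces by slicing after the loop instead of flushing an accumulator inside it.

-- ===== PORT A =====
-- A's loop body from face_int on: bin(face_int)[2:].zfill(8), then re-parse the three bit fields
-- (none = the ValueError/IndexError Python would raise there; propagated by the fold)
def pvFaceA? (faceInt : Int) : Option (List (String × Int)) :=
  let faceBin := PySem.Chars.zfill (PySem.List.slice (PySem.Int.toBinChars0b faceInt) (some 2) none) 8
  match PySem.List.pyGet? faceBin 0 with
  | none => none
  | some c0 =>
    match PySem.Int.ofCharsBase? [c0] 2 with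
    | none => none
    | some sign =>
      match PySem.Int.ofCharsBase? (PySem.List.slice faceBin (some 1) (some 6)) 2 with
      | none => none
      | some colorMag =>
        match PySem.Int.ofCharsBase? (PySem.List.slice faceBin (some 6) (some 8)) 2 with
        | none => none
        | some orient =>
          some (PySem.Dict.insert
                  (PySem.Dict.insert (PySem.Dict.empty : PySem.Dict String Int) "color"
                    (colorMag * (if sign ≠ 0 then -1 else 1)))
                  "orientation" orient).items

-- one iteration of A's for-loop (state none = an exception was raised earlier)
def pvStepA (cs : List Char)
    (st : Option (List (List (List (String × Int))) × List (List (String × Int)))) (i : Int) :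
    Option (List (List (List (String × Int))) × List (List (String × Int))) :=
  match st with
  | none => none
  | some (ruleset, faces) =>
    let p := if PySem.Int.mod i 12 == 0 && i != 0
             then (ruleset ++ [faces], ([] : List (List (String × Int))))
             else (ruleset, faces)
    match PySem.Int.ofCharsBase? (PySem.List.slice cs (some i) (some (i + 2))) 16 with
    | none => none
    | some faceInt =>
      match pvFaceA? faceInt with
      | none => none
      | some face => some (p.1, p.2 ++ [face])

def parseHexRule (hexRule : String) : List (List (List (String × Int))) :=
  match (PySem.List.pyRange 0 (PySem.Str.len hexRule) 2).foldl (pvStepA hexRule.toList)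
        (some ([], [])) with
  | none => []   -- unreachable under Pre_ (int(face_hex, 16) raised)
  | some (ruleset, faces) => ruleset ++ [faces]

-- ===== PORT B =====
-- B's byteToFace: the three bit fields by shifts and masks
def pvFaceB (v : Int) : List (String × Int) :=
  let sign := v >>> (7 : Nat)
  [("color", PySem.Int.band (v >>> (2 : Nat)) 31 * (if sign ≠ 0 then -1 else 1)),
   ("orientation", PySem.Int.band v 3)]

-- body of B's first comprehension (none = int() raised ValueError)
def pvItemB (cs : List Char) (i : Int) : Option (List (String × Int)) :=
  (PySem.Int.ofCharsBase? (PySem.List.slice cs (some i) (some (i + 2))) 16).map pvFaceB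

def parseHexRule_alt (hexRule : String) : List (List (List (String × Int))) :=
  match (PySem.List.pyRange 0 (PySem.Str.len hexRule) 2).mapM (pvItemB hexRule.toList) with
  | none => []   -- unreachable under Pre_
  | some faces =>
    let chunks := (PySem.List.pyRange 0 (PySem.List.len faces) 6).map
        (fun j => PySem.List.slice faces (some j) (some (j + 6)))
    if chunks.isEmpty then [[]] else chunks

-- ===== PRECONDITION & SPEC =====
def pvHexDigit (c : Char) : Bool :=
  ('0' ≤ c && c ≤ '9') || ('a' ≤ c && c ≤ 'f') || ('A' ≤ c && c ≤ 'F')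

-- Pre_ excludes the strings with a character that is not a hexadecimal digit: on those A raises
-- ValueError from int(face_hex, 16), except that Python's int() also tolerates a space or a plus
-- sign next to a digit inside a 2-character window (e.g. " 1", "+f"), so Pre_ is slightly narrower than A's returning
-- set; on those excluded inputs A and B both parse the window with int() and return the same value.
def Pre_parseHexRule (hexRule : String) : Prop := hexRule.toList.all pvHexDigit = true
instance (hexRule : String) : Decidable (Pre_parseHexRule hexRule) := by
  unfold Pre_parseHexRule; infer_instance

def pvWitness_parseHexRule : String := "8c0A04000085"

def Spec_parseHexRule (hexRule : String) (out : List (List (List (String × Int)))) : Prop := out = parseHexRule_alt hexRule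
instance (hexRule : String) (out : List (List (List (String × Int)))) : Decidable (Spec_parseHexRule hexRule out) := by unfold Spec_parseHexRule; infer_instance

-- ===== CLAIM (what is proved, stated in full; the proofs are below) =====
def Claim_equal_parseHexRule : Prop := ∀ (hexRule : String), Dom_parseHexRule hexRule → Pre_parseHexRule hexRule → Spec_parseHexRule hexRule (parseHexRule hexRule)

-- ===== LEMMAS AND PROOFS =====

-- the value of the byte at index i (defined when the parse succeeds; 0 otherwise)
def pvV (cs : List Char) (i : Int) : Int :=
  (PySem.Int.ofCharsBase? (PySem.List.slice cs (some i) (some (i + 2))) 16).getD 0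

def pvHexChars : List Char := "0123456789abcdefABCDEF".toList

-- parse succeeds with a byte value
def pvOk (l : List Char) : Bool :=
  match PySem.Int.ofCharsBase? l 16 with
  | some v => decide (0 ≤ v ∧ v < 256)
  | none => false

-- length of A's current group after k faces have been processed
def pvPosLen (k : Nat) : Nat := if k = 0 then 0 else (k - 1) % 6 + 1

-- A's grouping, abstracted: fill the current group fs (flush when full) from the face list
def pvFill : List (List (String × Int)) → List (List (String × Int)) → List (List (List (String × Int)))
  | fs, [] => [fs]
  | fs, f :: rest => if fs.length = 6 then fs :: pvFill [f] rest else pvFill (fs ++ [f]) rest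

-- chunks of 6 from the front, at least one chunk
def pvTop (L : List (List (String × Int))) : List (List (List (String × Int))) :=
  L.take 6 :: (if h : L.drop 6 = [] then [] else pvTop (L.drop 6))
termination_by L.length
decreasing_by
  simp only [List.drop_eq_nil_iff, not_le] at h
  simp only [List.length_drop]
  omega

lemma pvHex_mem (c : Char) (h : pvHexDigit c = true) : c ∈ pvHexChars := by
  have hb : (48 ≤ c.toNat ∧ c.toNat ≤ 57) ∨ (97 ≤ c.toNat ∧ c.toNat ≤ 102) ∨ (65 ≤ c.toNat ∧ c.toNat ≤ 70) := by
    simp only [pvHexDigit, Bool.or_eq_true, Bool.and_eq_true, decide_eq_true_eq, Char.le_def,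
      UInt32.le_iff_toNat_le, show '0'.val.toNat = 48 from rfl, show '9'.val.toNat = 57 from rfl,
      show 'a'.val.toNat = 97 from rfl, show 'f'.val.toNat = 102 from rfl,
      show 'A'.val.toNat = 65 from rfl, show 'F'.val.toNat = 70 from rfl] at h
    tauto
  have hc : Char.ofNat c.toNat = c := Char.ofNat_toNat c
  rw [← hc]
  rcases hb with ⟨h1, h2⟩ | ⟨h1, h2⟩ | ⟨h1, h2⟩ <;> interval_cases c.toNat <;> decide

lemma pvOk_one : pvHexChars.all (fun c => pvOk [c]) = true := by decide

lemma pvOk_two : pvHexChars.all (fun c => pvHexChars.all (fun d => pvOk [c, d])) = true := by decide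

set_option maxRecDepth 10000 in
lemma face_eq_fin : ∀ n : Fin 256, pvFaceA? ((n : Nat) : Int) = some (pvFaceB ((n : Nat) : Int)) := by
  decide

lemma face_eq (v : Int) (h0 : 0 ≤ v) (h1 : v < 256) : pvFaceA? v = some (pvFaceB v) := by
  have hv : v = ((v.toNat : Nat) : Int) := by omega
  rw [hv]
  exact face_eq_fin ⟨v.toNat, by omega⟩

-- under Pre_, the slice at an even index in range parses to a byte value
lemma slice_parse (cs : List Char) (hall : cs.all pvHexDigit = true) (k : Nat)
    (hk : 2 * k < cs.length) :
    PySem.Int.ofCharsBase? (PySem.List.slice cs (some ((2 * k : Nat) : Int)) (some (((2 * k : Nat) : Int) + 2))) 16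
      = some (pvV cs ((2 * k : Nat) : Int))
    ∧ 0 ≤ pvV cs ((2 * k : Nat) : Int) ∧ pvV cs ((2 * k : Nat) : Int) < 256 := by
  have hsl : PySem.List.slice cs (some ((2 * k : Nat) : Int)) (some (((2 * k : Nat) : Int) + 2))
      = (cs.drop (2 * k)).take 2 := by
    have h2 : ((2 * k : Nat) : Int) + 2 = ((2 * k : Nat) : Int) + ((2 : Nat) : Int) := by norm_num
    rw [h2, PySem.List.slice_natCast_add]
  have hok : pvOk ((cs.drop (2 * k)).take 2) = true := by
    have hmem : ∀ c ∈ (cs.drop (2 * k)).take 2, c ∈ pvHexChars := by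
      intro c hc
      exact pvHex_mem c ((List.all_eq_true.mp hall) c
        (List.mem_of_mem_drop (List.mem_of_mem_take hc)))
    cases hd : cs.drop (2 * k) with
    | nil =>
      exfalso
      have := List.drop_eq_nil_iff.mp hd
      omega
    | cons c rest =>
      cases rest with
      | nil =>
        have hc : c ∈ pvHexChars := hmem c (by simp [hd])
        simpa [hd] using (List.all_eq_true.mp pvOk_one) c hc
      | cons d r =>
        have hc : c ∈ pvHexChars := hmem c (by simp [hd])
        have hdm : d ∈ pvHexChars := hmem d (by simp [hd, List.take])
        simpa [hd, List.take] using
          (List.all_eq_true.mp ((List.all_eq_true.mp pvOk_two) c hc)) d hdm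
  unfold pvV
  rw [hsl]
  unfold pvOk at hok
  cases hp : PySem.Int.ofCharsBase? ((cs.drop (2 * k)).take 2) 16 with
  | none => rw [hp] at hok; simp at hok
  | some v =>
    rw [hp] at hok
    simp only [decide_eq_true_eq] at hok
    simp [hok]

lemma pyRange_two (N : Nat) :
    PySem.List.pyRange 0 (N : Int) 2 = (List.range ((N + 1) / 2)).map (fun k => ((2 * k : Nat) : Int)) := by
  rw [PySem.List.pyRange_of_pos _ _ (by norm_num)]
  have hcount : (if (0:Int) < N then (((N:Int) - 0 + 2 - 1) / 2).toNat else 0) = (N + 1) / 2 := by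
    split_ifs <;> omega
  rw [hcount]
  apply List.map_congr_left
  intro k _
  push_cast
  ring

lemma pyRange_six (M : Nat) :
    PySem.List.pyRange 0 (M : Int) 6 = (List.range ((M + 5) / 6)).map (fun k => ((6 * k : Nat) : Int)) := by
  rw [PySem.List.pyRange_of_pos _ _ (by norm_num)]
  have hcount : (if (0:Int) < M then (((M:Int) - 0 + 6 - 1) / 6).toNat else 0) = (M + 5) / 6 := by
    split_ifs <;> omega
  rw [hcount]
  apply List.map_congr_left
  intro k _
  push_cast
  ring

lemma mapM_some {α β : Type} (f : α → Option β) (g : α → β) :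
    ∀ l : List α, (∀ x ∈ l, f x = some (g x)) → l.mapM f = some (l.map g) := by
  intro l
  induction l with
  | nil => intro _; rfl
  | cons x xs ih =>
    intro h
    rw [List.mapM_cons, h x (by simp), ih (fun y hy => h y (by simp [hy]))]
    rfl

lemma fill_eq (L : List (List (String × Int))) :
    ∀ fs, fs.length ≤ 6 → pvFill fs L = pvTop (fs ++ L) := by
  induction L with
  | nil =>
    intro fs h
    rw [pvFill, pvTop]
    simp [List.take_of_length_le h, List.drop_eq_nil_iff.mpr h]
  | cons f rest ih =>
    intro fs h
    by_cases h6 : fs.length = 6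
    · rw [show pvFill fs (f :: rest) = fs :: pvFill [f] rest from by rw [pvFill]; simp [h6]]
      rw [ih [f] (by simp)]
      have ht : (fs ++ f :: rest).take 6 = fs := by
        rw [← h6]; exact List.take_left
      have hd : (fs ++ f :: rest).drop 6 = f :: rest := by
        rw [← h6]; exact List.drop_left
      conv_rhs => rw [pvTop]
      rw [ht, hd]
      simp
    · rw [show pvFill fs (f :: rest) = pvFill (fs ++ [f]) rest from by rw [pvFill]; simp [h6]]
      rw [ih (fs ++ [f]) (by simp; omega)]
      simp

lemma foldA_eq (cs : List Char) (hall : cs.all pvHexDigit = true) :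
    ∀ (j k : Nat) (rs : List (List (List (String × Int)))) (fs : List (List (String × Int))),
      k + j ≤ (cs.length + 1) / 2 → fs.length = pvPosLen k →
      (match (List.range' k j).foldl (fun st t => pvStepA cs st ((2 * t : Nat) : Int)) (some (rs, fs)) with
       | none => ([] : List (List (List (String × Int))))
       | some (r, f) => r ++ [f])
      = rs ++ pvFill fs ((List.range' k j).map (fun t => pvFaceB (pvV cs ((2 * t : Nat) : Int)))) := by
  intro j
  induction j with
  | zero =>
    intro k rs fs _ _
    simp [pvFill]
  | succ j ih =>
    intro k rs fs hle hlen
    have h2k : 2 * k < cs.length := by omega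
    obtain ⟨hp, hge, hlt⟩ := slice_parse cs hall k h2k
    have hface := face_eq _ hge hlt
    rw [List.range'_succ, List.foldl_cons, List.map_cons]
    have hcondIff : ((PySem.Int.mod ((2 * k : Nat) : Int) 12 == 0 && ((2 * k : Nat) : Int) != 0) = true)
        ↔ (k ≠ 0 ∧ k % 6 = 0) := by
      rw [PySem.Int.mod_eq_emod_of_pos (by norm_num)]
      simp only [Bool.and_eq_true, beq_iff_eq, bne_iff_ne, ne_eq]
      constructor
      · rintro ⟨h1, h2⟩
        refine ⟨by omega, by omega⟩
      · rintro ⟨h1, h2⟩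
        refine ⟨by omega, by omega⟩
    by_cases hk6 : k ≠ 0 ∧ k % 6 = 0
    · have hcond := hcondIff.mpr hk6
      have h6 : fs.length = 6 := by
        rw [hlen]; unfold pvPosLen; split_ifs <;> omega
      have hstep : pvStepA cs (some (rs, fs)) ((2 * k : Nat) : Int)
          = some (rs ++ [fs], [pvFaceB (pvV cs ((2 * k : Nat) : Int))]) := by
        unfold pvStepA
        simp only [hcond, reduceIte, hp, hface, List.nil_append]
      rw [hstep]
      rw [ih (k + 1) (rs ++ [fs]) [pvFaceB (pvV cs ((2 * k : Nat) : Int))] (by omega)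
        (by simp only [List.length_cons, List.length_nil]
            unfold pvPosLen; split_ifs <;> omega)]
      rw [show pvFill fs (pvFaceB (pvV cs ((2 * k : Nat) : Int)) ::
            (List.range' (k + 1) j).map (fun t => pvFaceB (pvV cs ((2 * t : Nat) : Int))))
          = fs :: pvFill [pvFaceB (pvV cs ((2 * k : Nat) : Int))]
            ((List.range' (k + 1) j).map (fun t => pvFaceB (pvV cs ((2 * t : Nat) : Int))))
        from by rw [pvFill]; simp [h6]]
      simp
    · have hcond : (PySem.Int.mod ((2 * k : Nat) : Int) 12 == 0 && ((2 * k : Nat) : Int) != 0) = false :=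
        Bool.eq_false_iff.mpr (fun h => hk6 (hcondIff.mp h))
      have h6 : fs.length ≠ 6 := by
        rw [hlen]; unfold pvPosLen; split_ifs <;> omega
      have hstep : pvStepA cs (some (rs, fs)) ((2 * k : Nat) : Int)
          = some (rs, fs ++ [pvFaceB (pvV cs ((2 * k : Nat) : Int))]) := by
        unfold pvStepA
        simp only [hcond, hp, hface]
        rfl
      rw [hstep]
      rw [ih (k + 1) rs (fs ++ [pvFaceB (pvV cs ((2 * k : Nat) : Int))]) (by omega)
        (by simp only [List.length_append, List.length_cons, List.length_nil, hlen]
            unfold pvPosLen; split_ifs <;> omega)]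
      rw [show pvFill fs (pvFaceB (pvV cs ((2 * k : Nat) : Int)) ::
            (List.range' (k + 1) j).map (fun t => pvFaceB (pvV cs ((2 * t : Nat) : Int))))
          = pvFill (fs ++ [pvFaceB (pvV cs ((2 * k : Nat) : Int))])
            ((List.range' (k + 1) j).map (fun t => pvFaceB (pvV cs ((2 * t : Nat) : Int))))
        from by rw [pvFill]; simp [h6]]

lemma chunksB (t : Nat) :
    ∀ L : List (List (String × Int)), L ≠ [] → t = (L.length + 5) / 6 →
      (List.range t).map (fun k => PySem.List.slice L (some ((6 * k : Nat) : Int)) (some (((6 * k : Nat) : Int) + 6)))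
        = pvTop L := by
  induction t with
  | zero =>
    intro L hL ht
    exfalso
    have : 0 < L.length := List.length_pos_of_ne_nil hL
    omega
  | succ t ih =>
    intro L hL ht
    have hslice : ∀ (M : List (List (String × Int))) (k : Nat),
        PySem.List.slice M (some ((6 * k : Nat) : Int)) (some (((6 * k : Nat) : Int) + 6))
          = (M.drop (6 * k)).take 6 := by
      intro M k
      rw [show ((6 * k : Nat) : Int) + 6 = ((6 * k : Nat) : Int) + ((6 : Nat) : Int) from by norm_num,
        PySem.List.slice_natCast_add]
    rw [List.range_succ_eq_map]
    simp only [List.map_cons, List.map_map]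
    have hhead : PySem.List.slice L (some ((6 * 0 : Nat) : Int)) (some (((6 * 0 : Nat) : Int) + 6))
        = L.take 6 := by
      rw [hslice]
      simp
    have hlen : 0 < L.length := List.length_pos_of_ne_nil hL
    by_cases hd : L.drop 6 = []
    · have hle6 : L.length ≤ 6 := List.drop_eq_nil_iff.mp hd
      have ht0 : t = 0 := by omega
      conv_rhs => rw [pvTop]
      rw [dif_pos hd]
      simp only [ht0, List.range_zero, List.map_nil]
      rw [hhead]
    · have hgt6 : 6 < L.length := by
        by_contra hc
        exact hd (List.drop_eq_nil_iff.mpr (by omega))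
      have htail : (List.range t).map
            ((fun k => PySem.List.slice L (some ((6 * k : Nat) : Int)) (some (((6 * k : Nat) : Int) + 6))) ∘ (fun k => k + 1))
          = (List.range t).map (fun k => PySem.List.slice (L.drop 6) (some ((6 * k : Nat) : Int)) (some (((6 * k : Nat) : Int) + 6))) := by
        apply List.map_congr_left
        intro k _
        simp only [Function.comp]
        rw [hslice, hslice, List.drop_drop]
        congr 2
        omega
      rw [htail]
      rw [ih (L.drop 6) hd (by simp only [List.length_drop]; omega)]
      conv_rhs => rw [pvTop]
      rw [dif_neg hd, hhead]

-- ===== VERDICT (by name: the statement is the Claim_ definition above) =====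
theorem parseHexRule_spec : Claim_equal_parseHexRule := by
  intro hexRule _ hpre
  unfold Spec_parseHexRule
  have hall : hexRule.toList.all pvHexDigit = true := hpre
  unfold parseHexRule parseHexRule_alt
  rw [show PySem.Str.len hexRule = ((hexRule.toList.length : Nat) : Int) from by
    simp [pysem]]
  rw [pyRange_two hexRule.toList.length]
  have hmap : ((List.range ((hexRule.toList.length + 1) / 2)).map (fun k => ((2 * k : Nat) : Int))).mapM (pvItemB hexRule.toList)
      = some (((List.range ((hexRule.toList.length + 1) / 2)).map (fun k => ((2 * k : Nat) : Int))).map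
          (fun i => pvFaceB (pvV hexRule.toList i))) := by
    apply mapM_some
    intro i hi
    obtain ⟨k, hk, rfl⟩ := List.mem_map.mp hi
    have h2k : 2 * k < hexRule.toList.length := by
      have := List.mem_range.mp hk
      omega
    obtain ⟨hp, -, -⟩ := slice_parse hexRule.toList hall k h2k
    unfold pvItemB
    rw [hp]
    rfl
  rw [hmap, List.map_map]
  have hA := foldA_eq hexRule.toList hall ((hexRule.toList.length + 1) / 2) 0 [] [] (by omega)
    (by simp [pvPosLen])
  rw [← List.range_eq_range'] at hA
  simp only [List.foldl_map]
  rw [hA, List.nil_append, fill_eq _ [] (by simp), List.nil_append]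
  have hcomp : (List.range ((hexRule.toList.length + 1) / 2)).map
        ((fun i => pvFaceB (pvV hexRule.toList i)) ∘ (fun k => ((2 * k : Nat) : Int)))
      = (List.range ((hexRule.toList.length + 1) / 2)).map (fun t => pvFaceB (pvV hexRule.toList ((2 * t : Nat) : Int))) := rfl
  rw [hcomp]
  set Lf := (List.range ((hexRule.toList.length + 1) / 2)).map
      (fun t => pvFaceB (pvV hexRule.toList ((2 * t : Nat) : Int))) with hLf
  show pvTop Lf =
    if ((PySem.List.pyRange 0 (PySem.List.len Lf) 6).map
        (fun j => PySem.List.slice Lf (some j) (some (j + 6)))).isEmpty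
    then [[]]
    else (PySem.List.pyRange 0 (PySem.List.len Lf) 6).map
        (fun j => PySem.List.slice Lf (some j) (some (j + 6)))
  have hlenLf : Lf.length = (hexRule.toList.length + 1) / 2 := by
    rw [hLf]; simp
  rw [show PySem.List.len Lf = ((Lf.length : Nat) : Int) from by simp [pysem]]
  rw [pyRange_six Lf.length, List.map_map]
  by_cases hm0 : Lf = []
  · rw [hm0]
    rw [pvTop]
    simp
  · have hchunks : (List.range ((Lf.length + 5) / 6)).map
          ((fun j => PySem.List.slice Lf (some j) (some (j + 6))) ∘ (fun k => ((6 * k : Nat) : Int)))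
        = pvTop Lf := chunksB ((Lf.length + 5) / 6) Lf hm0 rfl
    rw [hchunks]
    have : (pvTop Lf).isEmpty = false := by
      rw [pvTop]
      rfl
    simp [this]
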